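-- pv_equiv track=rewrite | github.com/bozhiliu85/RASSDL | main.py | add_backslash
-- ===== SOURCE A (Python) =====
-- def add_backslash(str_name):
--     l = len(str_name)
--     new_name = ''
--     for i in range(l):
--         if str_name[i] == '(':
--             new_name = new_name + '\('
--         elif str_name[i] == ')':
--             new_name = new_name + '\)'
--         else:
--             new_name = new_name + str_name[i]
--     return new_name
-- ===== SOURCE B (Python) =====
-- def add_backslash(str_name):
--     return str_name.replace('(', '\\(').replace(')', '\\)')
-- ===== Notes on version B (the rewrite author's own statement) =====
-- stated objective: faster
-- what changed: Replaces the per-character indexing loop with a three-way branch and quadratic string-concatenation accumulator by two chained str.replace substitutions with no explicit loop, index or accumulator.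
import Mathlib
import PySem

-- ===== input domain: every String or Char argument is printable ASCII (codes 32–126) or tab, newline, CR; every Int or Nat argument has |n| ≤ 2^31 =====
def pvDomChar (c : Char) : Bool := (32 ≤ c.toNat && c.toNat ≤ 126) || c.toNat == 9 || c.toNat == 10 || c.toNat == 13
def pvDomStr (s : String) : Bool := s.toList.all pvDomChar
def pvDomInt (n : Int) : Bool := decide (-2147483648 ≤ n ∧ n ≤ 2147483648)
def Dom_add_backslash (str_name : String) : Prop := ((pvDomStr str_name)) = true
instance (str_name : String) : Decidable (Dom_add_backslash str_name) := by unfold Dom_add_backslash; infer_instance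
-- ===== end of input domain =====

-- B replaces A's per-character indexed loop by two chained str.replace substitutions (idiomatic).

-- ===== PORT A =====
def add_backslash (str_name : String) : String :=
  let l : Int := PySem.Str.len str_name
  (PySem.List.pyRange 0 l 1).foldl
    (fun new_name i =>
      match PySem.Str.pyGet? str_name i with
      | some c =>
          if c = '(' then new_name ++ "\\("
          else if c = ')' then new_name ++ "\\)"
          else new_name ++ String.ofList [c]
      | none => new_name)
    ""

-- ===== PORT B =====
def add_backslash_alt (str_name : String) : String :=
  PySem.Str.replace (PySem.Str.replace str_name "(" "\\(") ")" "\\)"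

-- ===== PRECONDITION & SPEC =====
def Spec_add_backslash (str_name : String) (out : String) : Prop := out = add_backslash_alt str_name
instance (str_name : String) (out : String) : Decidable (Spec_add_backslash str_name out) := by unfold Spec_add_backslash; infer_instance

-- ===== CLAIM (what is proved, stated in full; the proofs are below) =====
def Claim_equal_add_backslash : Prop := ∀ (str_name : String), Dom_add_backslash str_name → Spec_add_backslash str_name (add_backslash str_name)

-- ===== LEMMAS AND PROOFS =====

/-- The single-character escape map both programs realize. -/
def escChar (c : Char) : List Char :=
  if c = '(' then ['\\', '(']
  else if c = ')' then ['\\', ')']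
  else [c]

/-- `Chars.replace.go` with a nonempty `old` and enough fuel: single-char case characterisation. -/
lemma replace_go_single (o : Char) (new : List Char) :
    ∀ (fuel : Nat) (l acc : List Char), l.length ≤ fuel →
      PySem.Chars.replace.go [o] new fuel l acc
        = acc.reverse ++ l.flatMap (fun c => if c = o then new else [c]) := by
  intro fuel
  induction fuel with
  | zero =>
    intro l acc h
    have : l = [] := List.eq_nil_of_length_eq_zero (Nat.le_zero.mp h)
    subst this
    simp [PySem.Chars.replace.go]
  | succ n ih =>
    intro l acc h
    cases l with
    | nil => simp [PySem.Chars.replace.go]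
    | cons c t =>
      by_cases hc : c = o
      · subst hc
        have hpre : List.isPrefixOf [c] (c :: t) = true := by
          simp [List.isPrefixOf]
        rw [PySem.Chars.replace.go]
        simp only [hpre, if_pos]
        rw [ih _ _ (by simpa using Nat.le_of_succ_le_succ h)]
        simp
      · have hpre : List.isPrefixOf [o] (c :: t) = false := by
          simp [List.isPrefixOf]; exact fun h' => (hc h'.symm).elim
        rw [PySem.Chars.replace.go]
        simp only [hpre, Bool.false_eq_true, if_false]
        rw [ih _ _ (by simp only [List.length_cons] at h; omega)]
        simp [hc]

/-- Replacing a single character is a flatMap. -/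
lemma replace_single (o : Char) (new cs : List Char) :
    PySem.Chars.replace cs [o] new = cs.flatMap (fun c => if c = o then new else [c]) := by
  rw [PySem.Chars.replace]
  simp only [List.isEmpty_cons, Bool.false_eq_true, if_false]
  simpa using replace_go_single o new cs.length cs [] (le_refl _)

/-- A's indexed loop over `range(len(s))` equals a fold over the characters. -/
lemma foldl_pyRange_index (cs : List Char) (g : String → Char → String) (acc : String) :
    (PySem.List.pyRange 0 (cs.length : Int) 1).foldl
      (fun a i => match PySem.List.pyGet? cs i with
                  | some c => g a c
                  | none => a) acc
      = cs.foldl g acc := by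
  induction cs using List.reverseRecOn generalizing acc with
  | nil => simp [PySem.List.pyRange]
  | append_singleton ds c ih =>
    have hlen : ((ds ++ [c]).length : Int) = (ds.length : Int) + 1 := by
      simp
    rw [hlen, PySem.List.pyRange_one_succ_right (by positivity), List.foldl_append]
    have hcongr :
        (PySem.List.pyRange 0 (ds.length : Int) 1).foldl
          (fun a i => match PySem.List.pyGet? (ds ++ [c]) i with
                      | some x => g a x
                      | none => a) acc
        = (PySem.List.pyRange 0 (ds.length : Int) 1).foldl
          (fun a i => match PySem.List.pyGet? ds i with
                      | some x => g a x
                      | none => a) acc := by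
      apply PySem.List.foldl_congr_mem
      intro a i hi
      have hb := PySem.List.mem_pyRange_one.mp hi
      rw [PySem.List.pyGet?_of_nonneg _ hb.1, PySem.List.pyGet?_of_nonneg _ hb.1]
      have hlt : i.toNat < ds.length := by omega
      rw [List.getElem?_append_left hlt]
    rw [hcongr, ih]
    have hget : PySem.List.pyGet? (ds ++ [c]) (ds.length : Int) = some c :=
      PySem.List.pyGet?_append_length ds [] c
    simp only [List.foldl_cons, List.foldl_nil, hget]
    simp [List.foldl_append]

/-- A's character fold, seen on character lists. -/
lemma foldl_esc_toList (cs : List Char) (acc : String) :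
    (cs.foldl
      (fun a c =>
        if c = '(' then a ++ "\\("
        else if c = ')' then a ++ "\\)"
        else a ++ String.ofList [c]) acc).toList
      = acc.toList ++ cs.flatMap escChar := by
  induction cs generalizing acc with
  | nil => simp
  | cons c t ih =>
    simp only [List.foldl_cons, List.flatMap_cons]
    rw [ih]
    by_cases h1 : c = '('
    · subst h1; simp [escChar]
    · by_cases h2 : c = ')'
      · subst h2; simp [escChar, h1]
      · simp [escChar, h1, h2]

/-- B composes the two single-character replacements into `escChar`. -/
lemma double_replace_eq_esc (cs : List Char) :
    (cs.flatMap (fun c => if c = '(' then ['\\', '('] else [c])).flatMap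
      (fun c => if c = ')' then ['\\', ')'] else [c])
      = cs.flatMap escChar := by
  induction cs with
  | nil => rfl
  | cons c t ih =>
    simp only [List.flatMap_cons, List.flatMap_append]
    rw [ih]
    by_cases h1 : c = '('
    · subst h1; simp [escChar]
    · by_cases h2 : c = ')'
      · subst h2; simp [escChar, h1]
      · simp [escChar, h1, h2]

-- ===== VERDICT (by name: the statement is the Claim_ definition above) =====
theorem add_backslash_spec : Claim_equal_add_backslash := by
  intro s _
  unfold Spec_add_backslash add_backslash add_backslash_alt
  rw [← String.toList_inj]
  have hA :
      ((PySem.List.pyRange 0 (PySem.Str.len s) 1).foldl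
        (fun new_name i =>
          match PySem.Str.pyGet? s i with
          | some c =>
              if c = '(' then new_name ++ "\\("
              else if c = ')' then new_name ++ "\\)"
              else new_name ++ String.ofList [c]
          | none => new_name) "").toList
        = s.toList.flatMap escChar := by
    have hlen : PySem.Str.len s = (s.toList.length : Int) := by
      simp [PySem.Str.len]
    have hget : ∀ i, PySem.Str.pyGet? s i = PySem.List.pyGet? s.toList i := by
      intro i; simp [PySem.Str.pyGet?]
    simp only [hlen, hget]
    rw [foldl_pyRange_index s.toList
      (fun a c =>
        if c = '(' then a ++ "\\("
        else if c = ')' then a ++ "\\)"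
        else a ++ String.ofList [c]) ""]
    simpa using foldl_esc_toList s.toList ""
  rw [hA, PySem.Str.toList_replace, PySem.Str.toList_replace]
  have h1 : ("(" : String).toList = ['('] := rfl
  have h2 : (")" : String).toList = [')'] := rfl
  have h3 : ("\\(" : String).toList = ['\\', '('] := rfl
  have h4 : ("\\)" : String).toList = ['\\', ')'] := rfl
  rw [h1, h2, h3, h4, replace_single, replace_single,
    double_replace_eq_esc]
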